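-- pv_equiv track=rewrite | github.com/RamananVr/Leetcodepython | design/2656_maximum_sum_with_exactly_k_elements.py | maximizeSumSimulation
-- ===== SOURCE A (Python) =====
-- from typing import List
--
-- def maximizeSumSimulation(nums: List[int], k: int) -> int:
--     """
--     Simulation approach - actually modify the array.
--     """
--     nums = nums.copy()  # Don't modify original array
--     total_score = 0
--
--     for _ in range(k):
--         # Find maximum element and its index
--         max_val = max(nums)
--         max_idx = nums.index(max_val)
--
--         # Add to score
--         total_score += max_val
--
--         # Remove max element and add incremented value
--         nums[max_idx] = max_val + 1
--
--     return total_score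
-- ===== SOURCE B (Python) =====
-- def maximizeSumSimulation(nums, k):
--     """Closed form: each pick increments the running max by 1, so the score is
--     max(nums)*k + k*(k-1)/2, after a single max scan."""
--     if k <= 0:
--         return 0
--     m = max(nums)
--     return m * k + k * (k - 1) // 2
-- ===== Notes on version B (the rewrite author's own statement) =====
-- stated objective: faster
-- what changed: Replaces the k-iteration simulation loop (each pass rescanning the list for max and index) with a single max scan plus the arithmetic-series closed form max(nums)*k + k*(k-1)//2.
import Mathlib
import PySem

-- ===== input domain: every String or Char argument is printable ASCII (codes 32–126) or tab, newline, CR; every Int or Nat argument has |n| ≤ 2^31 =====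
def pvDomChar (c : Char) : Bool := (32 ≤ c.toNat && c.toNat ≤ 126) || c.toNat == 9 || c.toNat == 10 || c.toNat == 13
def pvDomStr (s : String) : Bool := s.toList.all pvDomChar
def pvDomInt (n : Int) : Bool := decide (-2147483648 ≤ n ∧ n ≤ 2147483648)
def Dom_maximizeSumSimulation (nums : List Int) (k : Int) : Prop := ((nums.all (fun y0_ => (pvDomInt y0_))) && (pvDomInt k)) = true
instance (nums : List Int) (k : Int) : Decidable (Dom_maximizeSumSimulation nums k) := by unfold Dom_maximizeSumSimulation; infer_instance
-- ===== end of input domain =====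

-- B replaces A's k-pass simulation loop by one max scan and the arithmetic-series closed form.

-- ===== PORT A =====
-- the body of `for _ in range(k)`: find max, find its index, add to score, write max+1 back
def maxSimLoopA : Nat → List Int → Int → Int
  | 0, _, s => s
  | n+1, xs, s =>
    match PySem.List.max? xs (fun y => y) with
    | none => s          -- Python raises ValueError on max([]); excluded by Pre_
    | some m =>
      match PySem.List.index? xs m with
      | none => s        -- unreachable: the max is a member
      | some idx => maxSimLoopA n (xs.set idx (m + 1)) (s + m)

def maximizeSumSimulation (nums : List Int) (k : Int) : Int :=
  maxSimLoopA k.toNat nums 0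

-- ===== PORT B =====
def maximizeSumSimulation_alt (nums : List Int) (k : Int) : Int :=
  if k ≤ 0 then 0
  else
    match PySem.List.max? nums (fun y => y) with
    | none => 0          -- Python raises ValueError on max([]); excluded by Pre_
    | some m => m * k + PySem.Int.floordiv (k * (k - 1)) 2

-- ===== PRECONDITION & SPEC =====
-- Pre_ excludes only empty nums with k ≥ 1, where both Pythons raise ValueError on max([]).
def Pre_maximizeSumSimulation (nums : List Int) (k : Int) : Prop := nums ≠ [] ∨ k ≤ 0
instance (nums : List Int) (k : Int) : Decidable (Pre_maximizeSumSimulation nums k) := by unfold Pre_maximizeSumSimulation; infer_instance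
def pvWitness_maximizeSumSimulation : List Int × Int := ([3, 1, 2], 4)

def Spec_maximizeSumSimulation (nums : List Int) (k : Int) (out : Int) : Prop := out = maximizeSumSimulation_alt nums k
instance (nums : List Int) (k : Int) (out : Int) : Decidable (Spec_maximizeSumSimulation nums k out) := by unfold Spec_maximizeSumSimulation; infer_instance

-- ===== CLAIM (what is proved, stated in full; the proofs are below) =====
def Claim_equal_maximizeSumSimulation : Prop := ∀ (nums : List Int) (k : Int), Dom_maximizeSumSimulation nums k → Pre_maximizeSumSimulation nums k → Spec_maximizeSumSimulation nums k (maximizeSumSimulation nums k)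

-- ===== LEMMAS AND PROOFS =====

-- characterisation of max? with the identity key on Int
theorem max?_id_eq_some_iff (xs : List Int) (m : Int) :
    PySem.List.max? xs (fun y => y) = some m ↔ m ∈ xs ∧ ∀ y ∈ xs, y ≤ m := by
  constructor
  · intro h
    exact ⟨PySem.List.max?_mem h, fun y hy => PySem.List.max?_isMax h y hy⟩
  · rintro ⟨hm, hub⟩
    cases hmax : PySem.List.max? xs (fun y => y) with
    | none =>
      rw [PySem.List.max?_eq_none_iff] at hmax
      simp [hmax] at hm
    | some m' =>
      have h1 : m ≤ m' := PySem.List.max?_isMax hmax m hm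
      have h2 : m' ≤ m := hub m' (PySem.List.max?_mem hmax)
      simp only [Option.some.injEq]
      omega

-- writing m+1 over an occurrence of the max m makes m+1 the new max
theorem max?_set_succ (xs : List Int) (m : Int) (idx : Nat)
    (hmax : PySem.List.max? xs (fun y => y) = some m)
    (hidx : PySem.List.index? xs m = some idx) :
    PySem.List.max? (xs.set idx (m + 1)) (fun y => y) = some (m + 1) := by
  obtain ⟨hk, _, _⟩ := PySem.List.getElem_of_index?_eq_some hidx
  rw [max?_id_eq_some_iff]
  constructor
  · have hlen : idx < (xs.set idx (m + 1)).length := by simpa using hk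
    have hmem1 : (xs.set idx (m + 1))[idx]'hlen ∈ xs.set idx (m + 1) :=
      List.getElem_mem hlen
    rwa [List.getElem_set_self hlen] at hmem1
  · intro y hy
    rcases List.mem_or_eq_of_mem_set hy with h | h
    · have := PySem.List.max?_isMax hmax y h
      omega
    · omega

-- triangular numbers
def tri : Nat → Int
  | 0 => 0
  | n + 1 => tri n + n

theorem tri_double (n : Nat) : 2 * tri n = (n : Int) * (n - 1) := by
  induction n with
  | zero => simp [tri]
  | succ n ih =>
    simp only [tri]
    push_cast
    push_cast at ih
    ring_nf
    ring_nf at ih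
    omega

-- the loop invariant: from any list whose max is m, n passes add m*n + tri n
theorem maxSimLoopA_eq (n : Nat) :
    ∀ (xs : List Int) (s m : Int), PySem.List.max? xs (fun y => y) = some m →
      maxSimLoopA n xs s = s + m * n + tri n := by
  induction n with
  | zero => intro xs s m _; simp [maxSimLoopA, tri]
  | succ n ih =>
    intro xs s m hmax
    have hmem : m ∈ xs := PySem.List.max?_mem hmax
    obtain ⟨idx, hidx⟩ := Option.isSome_iff_exists.mp
      ((PySem.List.index?_isSome_iff xs m).mpr hmem)
    have hmax' := max?_set_succ xs m idx hmax hidx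
    have := ih (xs.set idx (m + 1)) (s + m) (m + 1) hmax'
    simp only [maxSimLoopA, hmax, hidx, this, tri]
    push_cast
    ring

-- ===== VERDICT (by name: the statement is the Claim_ definition above) =====
theorem maximizeSumSimulation_spec : Claim_equal_maximizeSumSimulation := by
  intro nums k _ hpre
  unfold Spec_maximizeSumSimulation maximizeSumSimulation maximizeSumSimulation_alt
  by_cases hk : k ≤ 0
  · have : k.toNat = 0 := Int.toNat_of_nonpos hk
    simp [this, maxSimLoopA, hk]
  · have hne : nums ≠ [] := by
      rcases hpre with h | h
      · exact h
      · omega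
    cases hmax : PySem.List.max? nums (fun y => y) with
    | none => exact absurd ((PySem.List.max?_eq_none_iff _ _).mp hmax) hne
    | some m =>
      rw [maxSimLoopA_eq k.toNat nums 0 m hmax]
      simp only [hk, if_false]
      have hkt : ((k.toNat : Int)) = k := Int.toNat_of_nonneg (by omega)
      have htri := tri_double k.toNat
      rw [hkt] at htri
      rw [PySem.Int.floordiv_eq_ediv_of_pos (by norm_num), hkt]
      generalize hp : k * (k - 1) = p at htri ⊢
      have ht : tri k.toNat = p / 2 := by omega
      rw [ht]
      linarith
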